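-- pv_equiv track=rewrite | github.com/ChrisRojano08/octavo | 0OCTAVO0/Data mining/minning/R1_RojanoJimenezChristopher.py | combinaciones
-- ===== SOURCE A (Python) =====
-- def combinaciones(itemA, result, temp, i, j, n):
--     if len(temp) == n:
--         result.append(temp[:])
--         temp = []
--         return
--     if i == len(itemA):
--         return
--     for k in range(j, len(itemA[i])):
--         temp.append(itemA[i][k][0])
--         combinaciones(itemA, result, temp, i+1, 0, n)
--         temp.pop()
--     combinaciones(itemA, result, temp, i+1, 0, n)
--
--     return result
-- ===== SOURCE B (Python) =====
-- def combinaciones(itemA, result, temp, i, j, n):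
--     # Iterative explicit-stack DFS instead of recursion; mutates result identically
--     # (temp is net-unchanged, as in the original). Return value: None on the two
--     # entry guards, else the result list.
--     if len(temp) == n:
--         result.append(temp[:])
--         return
--     if i == len(itemA):
--         return
--     stack = [(i, j, tuple(temp))]
--     while stack:
--         ii, jj, pref = stack.pop()
--         if len(pref) == n:
--             result.append(list(pref))
--             continue
--         if ii == len(itemA):
--             continue
--         row = itemA[ii]
--         stack.append((ii + 1, 0, pref))
--         for k in reversed(range(jj, len(row))):
--             stack.append((ii + 1, 0, pref + (row[k][0],)))
--     return result
-- ===== Notes on version B (the rewrite author's own statement) =====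
-- stated objective: alternative
-- what changed: Replaces the mutual self-recursion with an iterative DFS over an explicit work-stack of (index, start-column, prefix) frames, pushing the skip-frame and the reversed choice-frames so pops reproduce A's exact emission order; result is mutated identically and the None-vs-result return behaviour is kept.
import Mathlib
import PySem

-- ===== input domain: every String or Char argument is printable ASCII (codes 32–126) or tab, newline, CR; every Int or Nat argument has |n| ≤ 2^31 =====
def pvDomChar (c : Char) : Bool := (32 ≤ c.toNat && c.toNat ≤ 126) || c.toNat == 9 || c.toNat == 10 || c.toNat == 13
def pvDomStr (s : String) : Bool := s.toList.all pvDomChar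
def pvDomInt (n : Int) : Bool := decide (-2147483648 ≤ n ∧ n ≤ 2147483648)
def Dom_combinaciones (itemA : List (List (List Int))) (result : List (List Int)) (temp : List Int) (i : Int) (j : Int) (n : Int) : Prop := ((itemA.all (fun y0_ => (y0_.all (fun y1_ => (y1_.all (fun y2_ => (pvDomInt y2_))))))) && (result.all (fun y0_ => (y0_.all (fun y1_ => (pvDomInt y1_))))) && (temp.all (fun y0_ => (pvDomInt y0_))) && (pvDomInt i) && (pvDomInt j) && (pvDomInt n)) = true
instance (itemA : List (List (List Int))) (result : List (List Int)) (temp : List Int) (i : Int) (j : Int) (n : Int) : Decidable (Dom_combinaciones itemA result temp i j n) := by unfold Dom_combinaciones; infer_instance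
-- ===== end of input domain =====

-- B replaces A's recursion by an explicit work-stack loop (same emission order, same
-- return-value quirk); both mutate `result` identically and leave `temp` net-unchanged,
-- and the equivalence proved here is about the return value. Objective: alternative.

-- ===== PORT A =====
-- Recursion is fuel-indexed: fuel = (len(itemA) - i) + 1 levels suffice whenever i ≤ len(itemA)
-- (Pre_ guarantees this; the fuel-out branch returns `result` and is never reached under Pre_).
def combiGoA (itemA : List (List (List Int))) (n : Int) : Nat → Int → Int → List Int → List (List Int) → List (List Int)
  | 0, _, _, _, result => result
  | fuel+1, i, j, temp, result =>
    if (temp.length : Int) = n then result ++ [temp]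
    else if i = (itemA.length : Int) then result
    else
      let row := (PySem.List.pyGet? itemA i).getD []
      combiGoA itemA n fuel (i+1) 0 temp
        ((PySem.List.pyRange j (row.length : Int) 1).foldl
          (fun res k =>
            combiGoA itemA n fuel (i+1) 0
              (temp ++ [((PySem.List.pyGet? row k).getD []).headD 0]) res)
          result)

def combinaciones (itemA : List (List (List Int))) (result : List (List Int)) (temp : List Int) (i : Int) (j : Int) (n : Int) : Option (List (List Int)) :=
  if (temp.length : Int) = n then none          -- result.append(temp[:]); return  (return value None)
  else if i = (itemA.length : Int) then none    -- return  (return value None)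
  else some (combiGoA itemA n (((itemA.length : Int) - i).toNat + 1) i j temp result)

-- ===== PORT B =====
-- Fuel bound for the while loop: exact number of stack pops performed from one frame
-- (depends only on the remaining depth d, the start column, and the prefix length).
def combiCost (itemA : List (List (List Int))) (n : Int) : Nat → Int → Int → Nat → Nat
  | 0, _, _, _ => 1
  | d+1, ii, jj, L =>
    if (L : Int) = n then 1
    else
      let row := (PySem.List.pyGet? itemA ii).getD []
      1 + (PySem.List.pyRange jj (row.length : Int) 1).length * combiCost itemA n d (ii+1) 0 (L+1)
        + combiCost itemA n d (ii+1) 0 L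

-- while stack: pop a frame (ii, jj, pref); emit / drop / expand it (skip-frame pushed first,
-- then the choice frames for k in reversed(range(jj, len(row)))).
def combiGoB (itemA : List (List (List Int))) (n : Int) : Nat → List (Int × Int × List Int) → List (List Int) → List (List Int)
  | 0, _, result => result
  | _+1, [], result => result
  | fuel+1, (ii, jj, pref) :: stack, result =>
    if (pref.length : Int) = n then combiGoB itemA n fuel stack (result ++ [pref])
    else if ii = (itemA.length : Int) then combiGoB itemA n fuel stack result
    else
      let row := (PySem.List.pyGet? itemA ii).getD []
      combiGoB itemA n fuel
        ((PySem.List.pyRange jj (row.length : Int) 1).reverse.foldl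
          (fun st k =>
            (ii + 1, (0 : Int), pref ++ [((PySem.List.pyGet? row k).getD []).headD 0]) :: st)
          ((ii + 1, (0 : Int), pref) :: stack))
        result

def combinaciones_alt (itemA : List (List (List Int))) (result : List (List Int)) (temp : List Int) (i : Int) (j : Int) (n : Int) : Option (List (List Int)) :=
  if (temp.length : Int) = n then none
  else if i = (itemA.length : Int) then none
  else some (combiGoB itemA n
    (combiCost itemA n (((itemA.length : Int) - i).toNat) i j temp.length)
    [(i, j, temp)] result)

-- ===== PRECONDITION & SPEC =====
-- Pre_ is exactly where the Python A returns normally: unless one of the two entry guards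
-- fires, A raises IndexError for i below -len(itemA) or j below -len(itemA[i]) or when some
-- traversed innermost element list is empty (row i from column j on — python wrap for j < 0
-- touches the whole row — and every later row in full), and recurses forever for i > len(itemA).
def Pre_combinaciones (itemA : List (List (List Int))) (result : List (List Int)) (temp : List Int) (i : Int) (j : Int) (n : Int) : Prop :=
  ((temp.length : Int) = n) ∨ (i = (itemA.length : Int)) ∨
  ( -(itemA.length : Int) ≤ i ∧ i ≤ (itemA.length : Int) ∧
    -((((PySem.List.pyGet? itemA i).getD []).length : Int)) ≤ j ∧
    (∀ e ∈ (if 0 ≤ j then ((PySem.List.pyGet? itemA i).getD []).drop j.toNat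
            else ((PySem.List.pyGet? itemA i).getD [])), e ≠ ([] : List Int)) ∧
    (∀ row ∈ (if i < 0 then itemA else itemA.drop (i.toNat + 1)), ∀ e ∈ row, e ≠ ([] : List Int)) )

instance (itemA : List (List (List Int))) (result : List (List Int)) (temp : List Int) (i : Int) (j : Int) (n : Int) : Decidable (Pre_combinaciones itemA result temp i j n) := by
  unfold Pre_combinaciones; infer_instance

def pvWitness_combinaciones : List (List (List Int)) × List (List Int) × List Int × Int × Int × Int :=
  ([[[1], [2]], [[3]]], [], [], 0, 0, 2)

def Spec_combinaciones (itemA : List (List (List Int))) (result : List (List Int)) (temp : List Int) (i : Int) (j : Int) (n : Int) (out : Option (List (List Int))) : Prop := out = combinaciones_alt itemA result temp i j n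
instance (itemA : List (List (List Int))) (result : List (List Int)) (temp : List Int) (i : Int) (j : Int) (n : Int) (out : Option (List (List Int))) : Decidable (Spec_combinaciones itemA result temp i j n out) := by unfold Spec_combinaciones; infer_instance

-- ===== CLAIM (what is proved, stated in full; the proofs are below) =====
def Claim_equal_combinaciones : Prop := ∀ (itemA : List (List (List Int))) (result : List (List Int)) (temp : List Int) (i : Int) (j : Int) (n : Int), Dom_combinaciones itemA result temp i j n → Pre_combinaciones itemA result temp i j n → Spec_combinaciones itemA result temp i j n (combinaciones itemA result temp i j n)

-- ===== LEMMAS AND PROOFS =====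

-- Running a whole stack = folding A's recursive worker over its frames, each with its own exact fuel.
def combiRun (itemA : List (List (List Int))) (n : Int) (stack : List (Int × Int × List Int)) (result : List (List Int)) : List (List Int) :=
  stack.foldl
    (fun res f => combiGoA itemA n ((((itemA.length : Int) - f.1).toNat) + 1) f.1 f.2.1 f.2.2 res)
    result

def combiStackCost (itemA : List (List (List Int))) (n : Int) (stack : List (Int × Int × List Int)) : Nat :=
  (stack.map (fun f => combiCost itemA n (((itemA.length : Int) - f.1).toNat) f.1 f.2.1 f.2.2.length)).sum

theorem combiCost_pos (itemA : List (List (List Int))) (n : Int) (d : Nat) (ii jj : Int) (L : Nat) :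
    0 < combiCost itemA n d ii jj L := by
  cases d with
  | zero => simp [combiCost]
  | succ d => simp only [combiCost]; split <;> omega

theorem foldl_cons_reverse {α : Type} (l : List Int) (g : Int → α) (base : List α) :
    l.reverse.foldl (fun st k => g k :: st) base = l.map g ++ base := by
  induction l generalizing base with
  | nil => rfl
  | cons a l ih =>
      simp only [List.reverse_cons, List.foldl_append, List.foldl_cons, List.foldl_nil,
        List.map_cons, List.cons_append]
      rw [ih]

-- one-step unfolding of A's worker on a non-guard frame (fuel is a variable, so the
-- rewrite cannot recursively unfold the inner calls)
theorem combiGoA_succ (itemA : List (List (List Int))) (n : Int) (fuel : Nat) (i j : Int) (temp : List Int) (result : List (List Int)) (hL : ¬ (temp.length : Int) = n) (hEnd : ¬ i = (itemA.length : Int)) :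
    combiGoA itemA n (fuel+1) i j temp result =
      combiGoA itemA n fuel (i+1) 0 temp
        ((PySem.List.pyRange j ((((PySem.List.pyGet? itemA i).getD []).length : Int)) 1).foldl
          (fun res k =>
            combiGoA itemA n fuel (i+1) 0
              (temp ++ [((PySem.List.pyGet? ((PySem.List.pyGet? itemA i).getD []) k).getD []).headD 0]) res)
          result) := by
  simp [combiGoA, hL, hEnd]

theorem combiGoB_runs (itemA : List (List (List Int))) (n : Int) :
    ∀ (fuel : Nat) (stack : List (Int × Int × List Int)) (result : List (List Int)),
    (∀ f ∈ stack, f.1 ≤ (itemA.length : Int)) →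
    combiStackCost itemA n stack ≤ fuel →
    combiGoB itemA n fuel stack result = combiRun itemA n stack result := by
  intro fuel
  induction fuel with
  | zero =>
      intro stack result hinv hcost
      cases stack with
      | nil => rfl
      | cons f stack =>
          exfalso
          have h1 := combiCost_pos itemA n (((itemA.length : Int) - f.1).toNat) f.1 f.2.1 f.2.2.length
          simp [combiStackCost] at hcost
          omega
  | succ fuel ih =>
      intro stack result hinv hcost
      cases stack with
      | nil => rfl
      | cons f stack =>
          obtain ⟨ii, jj, pref⟩ := f
          have hii : ii ≤ (itemA.length : Int) := hinv ⟨ii, jj, pref⟩ (by simp)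
          by_cases hL : (pref.length : Int) = n
          · -- emitted frame: cost 1
            have hc1 : combiCost itemA n (((itemA.length : Int) - ii).toNat) ii jj pref.length = 1 := by
              cases hd : (((itemA.length : Int) - ii).toNat) with
              | zero => simp [combiCost]
              | succ d => simp [combiCost, hL]
            have hrest : combiStackCost itemA n stack ≤ fuel := by
              simp [combiStackCost, hc1] at hcost ⊢; omega
            simp only [combiGoB, hL, if_pos]
            rw [ih stack (result ++ [pref]) (fun f hf => hinv f (List.mem_cons_of_mem _ hf)) hrest]
            simp [combiRun, combiGoA, hL]
          · by_cases hEnd : ii = (itemA.length : Int)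
            · -- exhausted frame: cost 1
              have hd0 : (((itemA.length : Int) - ii).toNat) = 0 := by omega
              have hrest : combiStackCost itemA n stack ≤ fuel := by
                simp [combiStackCost, hd0, combiCost] at hcost ⊢; omega
              simp only [combiGoB, hL, hEnd, if_pos]
              rw [ih stack result (fun f hf => hinv f (List.mem_cons_of_mem _ hf)) hrest]
              simp [combiRun, combiGoA, hL]
            · -- expanded frame
              have hlt : ii < (itemA.length : Int) := lt_of_le_of_ne hii hEnd
              set row := (PySem.List.pyGet? itemA ii).getD [] with hrow
              set d' := (((itemA.length : Int) - (ii + 1)).toNat) with hd'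
              have hd : (((itemA.length : Int) - ii).toNat) = d' + 1 := by omega
              set asc := PySem.List.pyRange jj (row.length : Int) 1 with hasc
              set g : Int → Int × Int × List Int :=
                fun k => (ii + 1, (0 : Int), pref ++ [((PySem.List.pyGet? row k).getD []).headD 0]) with hg
              -- the new stack after the pushes
              have hstack2 :
                  asc.reverse.foldl (fun st k => g k :: st) ((ii + 1, (0 : Int), pref) :: stack)
                    = asc.map g ++ (ii + 1, (0 : Int), pref) :: stack :=
                foldl_cons_reverse asc g _
              -- cost bookkeeping
              have hcostf : combiCost itemA n (d' + 1) ii jj pref.length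
                  = 1 + asc.length * combiCost itemA n d' (ii+1) 0 (pref.length + 1)
                      + combiCost itemA n d' (ii+1) 0 pref.length := by
                simp [combiCost, hL, ← hrow, ← hasc]
              have hcostmap : (((asc.map g).map
                    (fun f => combiCost itemA n (((itemA.length : Int) - f.1).toNat) f.1 f.2.1 f.2.2.length)).sum)
                  = asc.length * combiCost itemA n d' (ii+1) 0 (pref.length + 1) := by
                rw [List.map_map]
                have : ((fun f => combiCost itemA n (((itemA.length : Int) - f.1).toNat) f.1 f.2.1 f.2.2.length) ∘ g)
                    = fun _ => combiCost itemA n d' (ii+1) 0 (pref.length + 1) := by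
                  funext k; simp [hg, ← hd']
                rw [this, List.map_const', List.sum_replicate, smul_eq_mul]
              have hcost2 : combiStackCost itemA n (asc.map g ++ (ii + 1, (0 : Int), pref) :: stack) ≤ fuel := by
                simp only [combiStackCost, List.map_append, List.sum_append, List.map_cons, List.sum_cons] at hcost ⊢
                rw [hcostmap]
                simp only [hd, hcostf] at hcost
                simp only [← hd']
                omega
              have hinv2 : ∀ f ∈ asc.map g ++ (ii + 1, (0 : Int), pref) :: stack, f.1 ≤ (itemA.length : Int) := by
                intro f hf
                rcases List.mem_append.mp hf with hf | hf
                · obtain ⟨k, _, rfl⟩ := List.mem_map.mp hf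
                  simp [hg]; omega
                · rcases List.mem_cons.mp hf with rfl | hf
                  · simp; omega
                  · exact hinv f (List.mem_cons_of_mem _ hf)
              -- reduce goB one step
              simp only [combiGoB, hL, hEnd, if_false]
              rw [hstack2]
              rw [ih _ result hinv2 hcost2]
              -- the run of the original frame, unfolded once
              have hrunR : combiRun itemA n ((ii, jj, pref) :: stack) result
                  = combiRun itemA n stack
                      (combiGoA itemA n ((((itemA.length : Int) - ii).toNat) + 1) ii jj pref result) := by
                simp [combiRun]
              rw [hrunR, hd, combiGoA_succ itemA n (d' + 1) ii jj pref result hL hEnd]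
              have hfix : ((((itemA.length : Int) - (ii + 1)).toNat) + 1) = d' + 1 := by omega
              simp [combiRun, List.foldl_append, List.foldl_map, hfix, hg, ← hrow, ← hasc]

-- ===== VERDICT (by name: the statement is the Claim_ definition above) =====
theorem combinaciones_spec : Claim_equal_combinaciones := by
  intro itemA result temp i j n _ hpre
  unfold Spec_combinaciones
  by_cases hL : (temp.length : Int) = n
  · simp [combinaciones, combinaciones_alt, hL]
  · by_cases hI : i = (itemA.length : Int)
    · simp [combinaciones, combinaciones_alt, hL, hI]
    · have hile : i ≤ (itemA.length : Int) := by
        rcases hpre with h | h | h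
        · exact absurd h hL
        · exact absurd h hI
        · exact h.2.1
      have := combiGoB_runs itemA n
        (combiCost itemA n (((itemA.length : Int) - i).toNat) i j temp.length)
        [(i, j, temp)] result
        (by intro f hf; rcases List.mem_cons.mp hf with rfl | hf
            · exact hile
            · simp at hf)
        (by simp [combiStackCost])
      simp only [combinaciones, combinaciones_alt, hL, hI, if_false]
      rw [this]
      simp [combiRun]
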